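-- pv_equiv track=rewrite | github.com/PRKKILLER/Algorithm_Practice | Company-OA/Robinhood/MinimumPeaks.py | solution
-- ===== SOURCE A (Python) =====
-- def solution(arr):
--     arr = arr[:]  # make copy (optional)
--     ans = []
--     while True:
--         # find the min peak
--         best = None
--         for i in range(len(arr)):
--             if i > 0 and arr[i] <= arr[i-1]:
--                 continue
--             if i+1 < len(arr) and arr[i] <= arr[i+1]:
--                 continue
--             if best is None or arr[i] < arr[best]:
--                 best = i
--         if best is None:
--             # no more min peaks
--             return ans
--         else:
--             # remove the min peak
--             ans.append(arr.pop(best))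
--
--     return ans
-- ===== SOURCE B (Python) =====
-- def solution(arr):
--     a = arr[:]
--
--     def is_peak(i):
--         return (i == 0 or a[i] > a[i - 1]) and (i == len(a) - 1 or a[i] > a[i + 1])
--
--     # worklist of current peak positions; only neighbours of a removal re-checked
--     cands = [i for i in range(len(a)) if is_peak(i)]
--     ans = []
--     while cands:
--         b = cands[0]
--         for i in cands:
--             if a[i] < a[b] or (a[i] == a[b] and i < b):
--                 b = i
--         ans.append(a.pop(b))
--         cands = [i - 1 if i > b else i for i in cands if i != b]
--         for j in (b - 1, b):
--             if 0 <= j < len(a) and is_peak(j):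
--                 cands.append(j)
--     return ans
-- ===== Notes on version B (the rewrite author's own statement) =====
-- stated objective: alternative
-- what changed: A rescans the whole remaining array to find the minimum peak after every removal; B computes the peak positions once into a worklist and after each removal only re-checks the two elements that became adjacent, picking the minimum (value, index) from the worklist.
import Mathlib
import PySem

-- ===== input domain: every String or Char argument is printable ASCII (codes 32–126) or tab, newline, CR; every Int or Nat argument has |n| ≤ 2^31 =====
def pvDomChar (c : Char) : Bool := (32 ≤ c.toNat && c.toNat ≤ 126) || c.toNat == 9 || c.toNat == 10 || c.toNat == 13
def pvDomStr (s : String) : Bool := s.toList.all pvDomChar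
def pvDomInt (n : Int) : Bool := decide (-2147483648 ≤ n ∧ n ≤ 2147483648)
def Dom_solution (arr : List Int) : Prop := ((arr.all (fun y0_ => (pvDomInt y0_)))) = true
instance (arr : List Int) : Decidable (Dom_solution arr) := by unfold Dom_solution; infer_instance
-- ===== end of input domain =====

-- B replaces A's full rescan per removal by a worklist of current peak positions,
-- re-checking only the two neighbours of each removed element (objective: alternative).

-- ===== PORT A =====
-- one step of A's inner scan: `continue` on the two guards, else keep/replace `best`
def fbStep (arr : List Int) (best : Option Nat) (i : Nat) : Option Nat :=
  if 0 < i ∧ arr.getD i 0 ≤ arr.getD (i - 1) 0 then best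
  else if i + 1 < arr.length ∧ arr.getD i 0 ≤ arr.getD (i + 1) 0 then best
  else
    match best with
    | none => some i
    | some b => if arr.getD i 0 < arr.getD b 0 then some i else best

-- the `for i in range(len(arr))` scan producing `best`
def findBest (arr : List Int) : Option Nat :=
  (List.range arr.length).foldl (fbStep arr) none

-- termination helper for the port's outer loop (the scan only ever selects an index of the array)
theorem fbStep_cases (arr : List Int) (acc : Option Nat) (i : Nat) :
    fbStep arr acc i = acc ∨ fbStep arr acc i = some i := by
  unfold fbStep
  split_ifs
  · left; rfl
  · left; rfl
  · cases acc with
    | none => right; rfl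
    | some b =>
      by_cases h : arr.getD i 0 < arr.getD b 0
      · right; exact if_pos h
      · left; exact if_neg h

theorem fbFold_lt (arr : List Int) :
    ∀ (is_ : List Nat) (acc : Option Nat) (b : Nat),
      (∀ x, acc = some x → x < arr.length) → (∀ i ∈ is_, i < arr.length) →
      is_.foldl (fbStep arr) acc = some b → b < arr.length := by
  intro is_
  induction is_ with
  | nil => intro acc b hacc _ h; exact hacc b h
  | cons i is ih =>
    intro acc b hacc hmem h
    refine ih (fbStep arr acc i) b ?_ (fun j hj => hmem j (List.mem_cons_of_mem _ hj)) h
    intro x hx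
    rcases fbStep_cases arr acc i with hc | hc
    · exact hacc x (hc ▸ hx)
    · rw [hc] at hx
      exact Option.some.inj hx ▸ hmem i (List.mem_cons_self ..)

theorem findBest_lt (arr : List Int) (b : Nat) (h : findBest arr = some b) : b < arr.length :=
  fbFold_lt arr _ none b (by simp) (fun i hi => List.mem_range.mp hi) h

-- A's `while True` loop: find best, return ans when None, else pop it and append
def solGo (arr : List Int) (ans : List Int) : List Int :=
  match h : findBest arr with
  | none => ans
  | some b => solGo (arr.eraseIdx b) (ans ++ [arr.getD b 0])
termination_by arr.length
decreasing_by
  have hb := findBest_lt arr b h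
  simp [List.length_eraseIdx, hb]
  omega

def solution (arr : List Int) : List Int := solGo arr []

-- ===== PORT B =====
-- Source B's is_peak(i) (short-circuit `or` kept as Bool `||`)
def isPeakB (a : List Int) (i : Nat) : Bool :=
  (i == 0 || decide (a.getD (i - 1) 0 < a.getD i 0)) &&
  (i == a.length - 1 || decide (a.getD (i + 1) 0 < a.getD i 0))

-- one step of Source B's `for i in cands: if (a[i],i) lex< (a[b],b): b = i`
def selStep (a : List Int) (b i : Nat) : Nat :=
  if a.getD i 0 < a.getD b 0 ∨ (a.getD i 0 = a.getD b 0 ∧ i < b) then i else b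

-- Source B's `while cands` loop (fuel only makes the recursion structural; it never runs out:
-- each round removes one element, so at most `len(arr)` rounds happen)
def goB (fuel : Nat) (a : List Int) (cands : List Nat) (ans : List Int) : List Int :=
  match cands, fuel with
  | [], _ => ans
  | _ :: _, 0 => ans
  | c :: cs, fuel' + 1 =>
    let b := (c :: cs).foldl (selStep a) c
    let a' := a.eraseIdx b
    let cands' := ((c :: cs).filter (fun i => i ≠ b)).map (fun i => if b < i then i - 1 else i)
    let cands'' := [(b : Int) - 1, (b : Int)].foldl
      (fun cs j => if 0 ≤ j ∧ j.toNat < a'.length ∧ isPeakB a' j.toNat then cs ++ [j.toNat] else cs)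
      cands'
    goB fuel' a' cands'' (ans ++ [a.getD b 0])

def solution_alt (arr : List Int) : List Int :=
  goB arr.length arr ((List.range arr.length).filter (fun i => isPeakB arr i)) []

-- ===== PRECONDITION & SPEC =====
def Spec_solution (arr : List Int) (out : List Int) : Prop := out = solution_alt arr
instance (arr : List Int) (out : List Int) : Decidable (Spec_solution arr out) := by unfold Spec_solution; infer_instance

-- ===== CLAIM (what is proved, stated in full; the proofs are below) =====
def Claim_equal_solution : Prop := ∀ (arr : List Int), Dom_solution arr → Spec_solution arr (solution arr)

-- ===== LEMMAS AND PROOFS =====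

-- `i` survives A's two `continue` guards (equivalently, Source B's is_peak): a strict peak
def IsPeak (l : List Int) (i : Nat) : Prop :=
  i < l.length ∧ ¬(0 < i ∧ l.getD i 0 ≤ l.getD (i - 1) 0) ∧
    ¬(i + 1 < l.length ∧ l.getD i 0 ≤ l.getD (i + 1) 0)

-- lexicographic (value, index) order both programs minimise
def LexLE (l : List Int) (b j : Nat) : Prop :=
  l.getD b 0 < l.getD j 0 ∨ (l.getD b 0 = l.getD j 0 ∧ b ≤ j)

theorem isPeakB_iff (a : List Int) (i : Nat) (hi : i < a.length) :
    isPeakB a i = true ↔ IsPeak a i := by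
  simp [isPeakB, IsPeak]
  omega

theorem lexLE_refl (l : List Int) (b : Nat) : LexLE l b b := by unfold LexLE; omega
theorem lexLE_trans (l : List Int) {a b c : Nat} (h1 : LexLE l a b) (h2 : LexLE l b c) :
    LexLE l a c := by unfold LexLE at *; omega
theorem lexLE_antisymm (l : List Int) {a b : Nat} (h1 : LexLE l a b) (h2 : LexLE l b a) :
    a = b := by unfold LexLE at *; omega


theorem fbStep_skip (arr : List Int) (acc : Option Nat) (i : Nat)
    (h : (0 < i ∧ arr.getD i 0 ≤ arr.getD (i - 1) 0) ∨
         (i + 1 < arr.length ∧ arr.getD i 0 ≤ arr.getD (i + 1) 0)) :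
    fbStep arr acc i = acc := by
  unfold fbStep
  by_cases h1 : 0 < i ∧ arr.getD i 0 ≤ arr.getD (i - 1) 0
  · rw [if_pos h1]
  · rw [if_neg h1, if_pos (h.resolve_left h1)]

theorem fbStep_go_none (arr : List Int) (i : Nat)
    (h1 : ¬(0 < i ∧ arr.getD i 0 ≤ arr.getD (i - 1) 0))
    (h2 : ¬(i + 1 < arr.length ∧ arr.getD i 0 ≤ arr.getD (i + 1) 0)) :
    fbStep arr none i = some i := by
  unfold fbStep; rw [if_neg h1, if_neg h2]

theorem fbStep_go_some (arr : List Int) (b i : Nat)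
    (h1 : ¬(0 < i ∧ arr.getD i 0 ≤ arr.getD (i - 1) 0))
    (h2 : ¬(i + 1 < arr.length ∧ arr.getD i 0 ≤ arr.getD (i + 1) 0)) :
    fbStep arr (some b) i = if arr.getD i 0 < arr.getD b 0 then some i else some b := by
  unfold fbStep; rw [if_neg h1, if_neg h2]

theorem fb_aux (arr : List Int) :
    ∀ n, n ≤ arr.length →
      ((List.range n).foldl (fbStep arr) none = none ∧ ∀ i < n, ¬ IsPeak arr i) ∨
      (∃ b, (List.range n).foldl (fbStep arr) none = some b ∧ b < n ∧ IsPeak arr b ∧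
        ∀ j < n, IsPeak arr j → LexLE arr b j) := by
  intro n
  induction n with
  | zero => intro _; left; simp
  | succ m ih =>
    intro hlen
    have hm : m < arr.length := hlen
    have step : (List.range (m + 1)).foldl (fbStep arr) none =
        fbStep arr ((List.range m).foldl (fbStep arr) none) m := by
      rw [List.range_succ, List.foldl_append]; rfl
    rcases ih (le_of_lt hm) with ⟨hnone, hno⟩ | ⟨b, hsome, hblt, hbp, hbmin⟩
    · rw [hnone] at step
      by_cases hskip : (0 < m ∧ arr.getD m 0 ≤ arr.getD (m - 1) 0) ∨
          (m + 1 < arr.length ∧ arr.getD m 0 ≤ arr.getD (m + 1) 0)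
      · left
        constructor
        · rw [step, fbStep_skip arr none m hskip]
        · intro i hi
          rcases Nat.lt_or_ge i m with h | h
          · exact hno i h
          · have : i = m := by omega
            subst this
            unfold IsPeak; tauto
      · right
        refine ⟨m, ?_, Nat.lt_succ_self m, ⟨hm, fun h => hskip (Or.inl h), fun h => hskip (Or.inr h)⟩, ?_⟩
        · have h1 : ¬(0 < m ∧ arr.getD m 0 ≤ arr.getD (m - 1) 0) := fun h => hskip (Or.inl h)
          have h2 : ¬(m + 1 < arr.length ∧ arr.getD m 0 ≤ arr.getD (m + 1) 0) := fun h => hskip (Or.inr h)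
          rw [step, fbStep_go_none arr m h1 h2]
        · intro j hj hpj
          rcases Nat.lt_or_ge j m with h | h
          · exact absurd hpj (hno j h)
          · have : j = m := by omega
            rw [this]; exact lexLE_refl arr m
    · rw [hsome] at step
      by_cases hskip : (0 < m ∧ arr.getD m 0 ≤ arr.getD (m - 1) 0) ∨
          (m + 1 < arr.length ∧ arr.getD m 0 ≤ arr.getD (m + 1) 0)
      · right
        refine ⟨b, ?_, by omega, hbp, ?_⟩
        · rw [step, fbStep_skip arr (some b) m hskip]
        · intro j hj hpj
          rcases Nat.lt_or_ge j m with h | h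
          · exact hbmin j h hpj
          · have : j = m := by omega
            subst this
            exact absurd hpj (by unfold IsPeak; tauto)
      · have h1 : ¬(0 < m ∧ arr.getD m 0 ≤ arr.getD (m - 1) 0) := fun h => hskip (Or.inl h)
        have h2 : ¬(m + 1 < arr.length ∧ arr.getD m 0 ≤ arr.getD (m + 1) 0) := fun h => hskip (Or.inr h)
        have hpm : IsPeak arr m := ⟨hm, h1, h2⟩
        by_cases hlt : arr.getD m 0 < arr.getD b 0
        · right
          refine ⟨m, ?_, Nat.lt_succ_self m, hpm, ?_⟩
          · rw [step, fbStep_go_some arr b m h1 h2, if_pos hlt]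
          · intro j hj hpj
            rcases Nat.lt_or_ge j m with h | h
            · exact lexLE_trans arr (Or.inl hlt) (hbmin j h hpj)
            · have : j = m := by omega
              rw [this]; exact lexLE_refl arr m
        · right
          refine ⟨b, ?_, by omega, hbp, ?_⟩
          · rw [step, fbStep_go_some arr b m h1 h2, if_neg hlt]
          · intro j hj hpj
            rcases Nat.lt_or_ge j m with h | h
            · exact hbmin j h hpj
            · have : j = m := by omega
              subst this
              unfold LexLE; omega

theorem findBest_none (arr : List Int) (h : findBest arr = none) :
    ∀ i, ¬ IsPeak arr i := by
  intro i hpi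
  rcases fb_aux arr arr.length le_rfl with ⟨_, hno⟩ | ⟨b, hsome, _⟩
  · exact hno i hpi.1 hpi
  · rw [findBest] at h; rw [h] at hsome; simp at hsome

theorem findBest_some (arr : List Int) (b : Nat) (h : findBest arr = some b) :
    IsPeak arr b ∧ ∀ j, IsPeak arr j → LexLE arr b j := by
  rcases fb_aux arr arr.length le_rfl with ⟨hnone, _⟩ | ⟨b', hsome, _, hbp, hbmin⟩
  · rw [findBest] at h; rw [h] at hnone; simp at hnone
  · rw [findBest] at h; rw [h] at hsome
    cases hsome
    exact ⟨hbp, fun j hpj => hbmin j hpj.1 hpj⟩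

theorem sel_spec (a : List Int) :
    ∀ (cs : List Nat) (b : Nat),
      cs.foldl (selStep a) b ∈ b :: cs ∧ ∀ j ∈ b :: cs, LexLE a (cs.foldl (selStep a) b) j := by
  intro cs
  induction cs with
  | nil =>
    intro b
    refine ⟨by simp, ?_⟩
    intro j hj
    simp only [List.foldl_nil]
    simp only [List.mem_cons, List.not_mem_nil, or_false] at hj
    rw [hj]
    exact lexLE_refl a b
  | cons i cs ih =>
    intro b
    have hfold : (i :: cs).foldl (selStep a) b = cs.foldl (selStep a) (selStep a b i) := rfl
    obtain ⟨hmem, hmin⟩ := ih (selStep a b i)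
    have hsel_mem : selStep a b i = b ∨ selStep a b i = i := by
      unfold selStep; split_ifs <;> simp
    have hsel_b : LexLE a (selStep a b i) b := by
      unfold selStep; split_ifs with h
      · unfold LexLE; omega
      · exact lexLE_refl a b
    have hsel_i : LexLE a (selStep a b i) i := by
      unfold selStep; split_ifs with h
      · exact lexLE_refl a i
      · unfold LexLE at *; omega
    constructor
    · rw [hfold]
      rcases List.mem_cons.mp hmem with h | h
      · rw [h]; rcases hsel_mem with h' | h' <;> simp [h']
      · simp [h]
    · intro j hj
      rw [hfold]
      have hr : LexLE a (cs.foldl (selStep a) (selStep a b i)) (selStep a b i) :=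
        hmin _ (List.mem_cons_self ..)
      rcases List.mem_cons.mp hj with h | h
      · rw [h]; exact lexLE_trans a hr hsel_b
      · rcases List.mem_cons.mp h with h' | h'
        · rw [h']; exact lexLE_trans a hr hsel_i
        · exact hmin j (List.mem_cons_of_mem _ h')

theorem getD_eraseIdx_lt (l : List Int) (b k : Nat) (h : k < b) :
    (l.eraseIdx b).getD k 0 = l.getD k 0 := by
  simp [List.getD_eq_getElem?_getD, List.getElem?_eraseIdx, h]

theorem getD_eraseIdx_ge (l : List Int) (b k : Nat) (h : b ≤ k) :
    (l.eraseIdx b).getD k 0 = l.getD (k + 1) 0 := by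
  have : ¬ k < b := by omega
  simp [List.getD_eq_getElem?_getD, List.getElem?_eraseIdx, this]

theorem peak_erase_lt (l : List Int) (b i : Nat) (hb : b < l.length) (h : i + 1 < b) :
    (IsPeak (l.eraseIdx b) i ↔ IsPeak l i) := by
  unfold IsPeak
  rw [List.length_eraseIdx_of_lt hb]
  rw [getD_eraseIdx_lt l b i (by omega), getD_eraseIdx_lt l b (i - 1) (by omega),
      getD_eraseIdx_lt l b (i + 1) (by omega)]
  omega

theorem peak_erase_gt (l : List Int) (b i : Nat) (hb : b < l.length) (h : b < i) :
    (IsPeak (l.eraseIdx b) i ↔ IsPeak l (i + 1)) := by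
  unfold IsPeak
  rw [List.length_eraseIdx_of_lt hb]
  rw [getD_eraseIdx_ge l b i (by omega), getD_eraseIdx_ge l b (i - 1) (by omega),
      getD_eraseIdx_ge l b (i + 1) (by omega)]
  rw [show i - 1 + 1 = i from by omega, show i + 1 + 1 = i + 2 from by omega,
      show i + 1 - 1 = i from by omega]
  omega

theorem peak_nb_left (l : List Int) (b : Nat) (hb : 0 < b) (hp : IsPeak l b) :
    ¬ IsPeak l (b - 1) := by
  obtain ⟨hlt, h1, h2⟩ := hp
  intro ⟨_, _, h2'⟩
  have : b - 1 + 1 = b := by omega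
  rw [this] at h2'
  unfold IsPeak at *
  omega

theorem peak_nb_right (l : List Int) (b : Nat) (hp : IsPeak l b) :
    ¬ IsPeak l (b + 1) := by
  obtain ⟨hlt, h1, h2⟩ := hp
  intro ⟨hlt', h1', _⟩
  rw [show b + 1 - 1 = b from rfl] at h1'
  omega

-- membership/bound form of the is_peak bridge
theorem bridge (m : List Int) (j : Nat) :
    (j < m.length ∧ isPeakB m j = true) ↔ IsPeak m j :=
  ⟨fun ⟨h1, h2⟩ => (isPeakB_iff m j h1).mp h2, fun hp => ⟨hp.1, (isPeakB_iff m j hp.1).mpr hp⟩⟩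

-- invariant step: after removing peak b, the updated worklist is exactly the peak set
theorem cands_step (l : List Int) (cands : List Nat) (b : Nat)
    (hinv : ∀ i, i ∈ cands ↔ IsPeak l i) (hpb : IsPeak l b) :
    ∀ i,
      (i ∈ [(b : Int) - 1, (b : Int)].foldl
        (fun cs j => if 0 ≤ j ∧ j.toNat < (l.eraseIdx b).length ∧ isPeakB (l.eraseIdx b) j.toNat
          then cs ++ [j.toNat] else cs)
        ((cands.filter (fun i => i ≠ b)).map (fun i => if b < i then i - 1 else i)))
      ↔ IsPeak (l.eraseIdx b) i := by
  intro i
  have hb : b < l.length := hpb.1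
  -- membership in the filtered/shifted worklist
  have hc' : ∀ i, i ∈ (cands.filter (fun i => i ≠ b)).map (fun i => if b < i then i - 1 else i) ↔
      ((IsPeak l i ∧ i < b) ∨ (IsPeak l (i + 1) ∧ b ≤ i)) := by
    intro i
    simp only [List.mem_map, List.mem_filter, decide_eq_true_eq]
    constructor
    · rintro ⟨j, ⟨hjmem, hjne⟩, hfj⟩
      have hjp : IsPeak l j := (hinv j).mp hjmem
      by_cases hbj : b < j
      · rw [if_pos hbj] at hfj
        right
        have hji : j = i + 1 := by omega
        exact ⟨hji ▸ hjp, by omega⟩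
      · rw [if_neg hbj] at hfj
        left
        exact ⟨hfj ▸ hjp, by omega⟩
    · rintro (⟨hp, hlt⟩ | ⟨hp, hge⟩)
      · exact ⟨i, ⟨(hinv i).mpr hp, by omega⟩, if_neg (by omega)⟩
      · exact ⟨i + 1, ⟨(hinv (i + 1)).mpr hp, by omega⟩, by rw [if_pos (by omega)]; omega⟩
  -- one conditional append
  have happ : ∀ (cs : List Nat) (j : Int) (x : Nat),
      (x ∈ (if 0 ≤ j ∧ j.toNat < (l.eraseIdx b).length ∧ isPeakB (l.eraseIdx b) j.toNat
            then cs ++ [j.toNat] else cs)) ↔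
      (x ∈ cs ∨ (0 ≤ j ∧ j.toNat < (l.eraseIdx b).length ∧
          isPeakB (l.eraseIdx b) j.toNat = true ∧ x = j.toNat)) := by
    intro cs j x
    split_ifs with h
    · simp only [List.mem_append, List.mem_cons, List.not_mem_nil, or_false]
      constructor
      · rintro (hx | hx)
        · exact Or.inl hx
        · exact Or.inr ⟨h.1, h.2.1, h.2.2, hx⟩
      · rintro (hx | hx)
        · exact Or.inl hx
        · exact Or.inr hx.2.2.2
    · constructor
      · exact Or.inl
      · rintro (hx | hx)
        · exact hx
        · exact absurd ⟨hx.1, hx.2.1, hx.2.2.1⟩ h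
  -- the full membership characterisation
  have hmain : (i ∈ [(b : Int) - 1, (b : Int)].foldl
        (fun cs j => if 0 ≤ j ∧ j.toNat < (l.eraseIdx b).length ∧ isPeakB (l.eraseIdx b) j.toNat
          then cs ++ [j.toNat] else cs)
        ((cands.filter (fun i => i ≠ b)).map (fun i => if b < i then i - 1 else i))) ↔
      ((IsPeak l i ∧ i < b) ∨ (IsPeak l (i + 1) ∧ b ≤ i) ∨
        (0 < b ∧ IsPeak (l.eraseIdx b) (b - 1) ∧ i = b - 1) ∨
        (IsPeak (l.eraseIdx b) b ∧ i = b)) := by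
    simp only [List.foldl_cons, List.foldl_nil]
    rw [happ, happ, hc']
    constructor
    · rintro (((h | h) | h) | h)
      · exact Or.inl h
      · exact Or.inr (Or.inl h)
      · -- the (b-1) append
        obtain ⟨hj0, hjlt, hjp, hjx⟩ := h
        have hb1 : 0 < b := by omega
        have htn : ((b : Int) - 1).toNat = b - 1 := by omega
        rw [htn] at hjlt hjp hjx
        exact Or.inr (Or.inr (Or.inl ⟨hb1, (bridge _ _).mp ⟨hjlt, hjp⟩, hjx⟩))
      · obtain ⟨_, hjlt, hjp, hjx⟩ := h
        have htn : ((b : Int)).toNat = b := by omega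
        rw [htn] at hjlt hjp hjx
        exact Or.inr (Or.inr (Or.inr ⟨(bridge _ _).mp ⟨hjlt, hjp⟩, hjx⟩))
    · rintro (h | h | ⟨hb1, hp, hx⟩ | ⟨hp, hx⟩)
      · exact Or.inl (Or.inl (Or.inl h))
      · exact Or.inl (Or.inl (Or.inr h))
      · refine Or.inl (Or.inr ⟨by omega, ?_, ?_, by omega⟩)
        · have htn : ((b : Int) - 1).toNat = b - 1 := by omega
          rw [htn]; exact hp.1
        · have htn : ((b : Int) - 1).toNat = b - 1 := by omega
          rw [htn]; exact ((bridge _ _).mpr hp).2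
      · refine Or.inr ⟨by omega, ?_, ?_, by omega⟩
        · have htn : ((b : Int)).toNat = b := by omega
          rw [htn]; exact hp.1
        · have htn : ((b : Int)).toNat = b := by omega
          rw [htn]; exact ((bridge _ _).mpr hp).2
  rw [hmain]
  -- now decide the iff by the position of i relative to b
  rcases Nat.lt_trichotomy i b with hib | hib | hib
  · by_cases hib2 : i + 1 < b
    · rw [peak_erase_lt l b i hb hib2]
      constructor
      · rintro (⟨hp, _⟩ | ⟨_, hge⟩ | ⟨_, _, hx⟩ | ⟨_, hx⟩)
        · exact hp
        · omega
        · omega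
        · omega
      · intro hp; exact Or.inl ⟨hp, hib⟩
    · -- i = b - 1 with 0 < b : the freshly re-checked left neighbour
      have hieq : i = b - 1 ∧ 0 < b := by omega
      constructor
      · rintro (⟨hp, _⟩ | ⟨_, hge⟩ | ⟨_, hp, hx⟩ | ⟨_, hx⟩)
        · exact absurd hp (by
            have hnb := peak_nb_left l b hieq.2 hpb
            rw [show i = b - 1 from hieq.1]; exact hnb)
        · omega
        · rw [hx]; exact hp
        · omega
      · intro hp
        refine Or.inr (Or.inr (Or.inl ⟨hieq.2, ?_, hieq.1⟩))
        rw [show b - 1 = i from by omega]; exact hp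
  · -- i = b : the freshly re-checked right-merge position
    subst hib
    constructor
    · rintro (⟨_, hlt⟩ | ⟨hp, _⟩ | ⟨hb1, _, hx⟩ | ⟨hp, _⟩)
      · omega
      · exact absurd hp (peak_nb_right l i hpb)
      · omega
      · exact hp
    · intro hp; exact Or.inr (Or.inr (Or.inr ⟨hp, rfl⟩))
  · rw [peak_erase_gt l b i hb hib]
    constructor
    · rintro (⟨_, hlt⟩ | ⟨hp, _⟩ | ⟨hb1, _, hx⟩ | ⟨_, hx⟩)
      · omega
      · exact hp
      · omega
      · omega
    · intro hp; exact Or.inr (Or.inl ⟨hp, by omega⟩)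

-- the main loop correspondence
theorem main_loop : ∀ (n : Nat) (a : List Int) (cands : List Nat) (ans : List Int),
    (∀ i, i ∈ cands ↔ IsPeak a i) → a.length ≤ n → solGo a ans = goB n a cands ans := by
  intro n
  induction n with
  | zero =>
    intro a cands ans hinv hlen
    have ha : a = [] := List.length_eq_zero_iff.mp (by omega)
    subst ha
    have hc : cands = [] := by
      cases cands with
      | nil => rfl
      | cons c cs =>
        have := ((hinv c).mp (List.mem_cons_self ..)).1
        simp at this
    subst hc
    rw [solGo]
    rfl
  | succ m ih =>
    intro a cands ans hinv hlen
    cases hfb : findBest a with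
    | none =>
      have hnp := findBest_none a hfb
      have hc : cands = [] := by
        cases cands with
        | nil => rfl
        | cons c cs => exact absurd ((hinv c).mp (List.mem_cons_self ..)) (hnp c)
      subst hc
      rw [solGo, hfb]
      rfl
    | some b =>
      obtain ⟨hpb, hbmin⟩ := findBest_some a b hfb
      have hbmem : b ∈ cands := (hinv b).mpr hpb
      cases cands with
      | nil => simp at hbmem
      | cons c cs =>
        obtain ⟨hrmem, hrmin⟩ := sel_spec a (c :: cs) c
        have hrmem' : (c :: cs).foldl (selStep a) c ∈ c :: cs := by
          rcases List.mem_cons.mp hrmem with h | h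
          · rw [h]; exact List.mem_cons_self ..
          · exact h
        have hrpeak : IsPeak a ((c :: cs).foldl (selStep a) c) :=
          (hinv _).mp hrmem'
        have hrb : (c :: cs).foldl (selStep a) c = b :=
          lexLE_antisymm a (hrmin b (List.mem_cons_of_mem _ hbmem))
            (hbmin _ hrpeak)
        rw [solGo, hfb, goB, hrb]
        exact ih (a.eraseIdx b) _ (ans ++ [a.getD b 0])
          (cands_step a (c :: cs) b hinv hpb)
          (by rw [List.length_eraseIdx_of_lt hpb.1]; omega)

-- ===== VERDICT (by name: the statement is the Claim_ definition above) =====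
theorem solution_spec : Claim_equal_solution := by
  unfold Claim_equal_solution
  intro arr _
  unfold Spec_solution solution solution_alt
  apply main_loop arr.length arr _ [] _ le_rfl
  intro i
  simp only [List.mem_filter, List.mem_range]
  constructor
  · rintro ⟨hi, hp⟩; exact (isPeakB_iff arr i hi).mp hp
  · intro hp; exact ⟨hp.1, (isPeakB_iff arr i hp.1).mpr hp⟩
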